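-- pv_equiv track=rewrite | github.com/mairbek/adventofcode2024 | 2025/day07.py | part2
-- ===== SOURCE A (Python) =====
-- def part2(grid):
--     n = len(grid)
--     m = len(grid[0])
--     si, sj = None, None
--     for i in range(n):
--         for j in range(m):
--             if grid[i][j] == "S":
--                 si, sj = i, j
--                 break
--     assert si is not None and sj is not None, "Start position not found"
--     counts = [[0 for _ in range(m)] for _ in range(n)]
--     counts[si][sj] = 1
--     for i in range(si + 1, n):
--         for j in range(m):
--             if grid[i][j] == ".":
--                 counts[i][j] += counts[i - 1][j]
--             elif grid[i][j] == "^":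
--                 if j >= 1:
--                     counts[i][j - 1] += counts[i - 1][j]
--                 if j < m - 1:
--                     counts[i][j + 1] += counts[i - 1][j]
--     return sum(counts[-1])
-- ===== SOURCE B (Python) =====
-- def part2(grid):
--     m = len(grid[0])
--     si, sj = None, None
--     for i in range(len(grid) - 1, -1, -1):
--         for j in range(m):
--             if grid[i][j] == "S":
--                 si, sj = i, j
--                 break
--         if si is not None:
--             break
--     assert si is not None and sj is not None, "Start position not found"
--     # backward (adjoint) sweep: up[j] = number of ways from a token sitting at
--     # column j of row i-1 to reach the last row; answer is up at the start cell
--     up = [1] * m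
--     for i in range(len(grid) - 1, si, -1):
--         row = grid[i]
--         up = [
--             up[j] if row[j] == "."
--             else ((up[j - 1] if j >= 1 else 0) + (up[j + 1] if j + 1 < m else 0))
--             if row[j] == "^" else 0
--             for j in range(m)
--         ]
--     return up[sj]
-- ===== Notes on version B (the rewrite author's own statement) =====
-- stated objective: alternative
-- what changed: B reverses the direction of the dynamic program: instead of A's forward pass pushing path-counts down from the start into an n-by-m counts table and summing the last row, B runs a backward (adjoint) sweep from the bottom row upward, maintaining for each column the number of ways to reach the last row from there, and simply reads off that value at the start cell; the intermediate quantities are different (suffix path-counts vs prefix path-counts) and no table is built.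
import Mathlib
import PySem

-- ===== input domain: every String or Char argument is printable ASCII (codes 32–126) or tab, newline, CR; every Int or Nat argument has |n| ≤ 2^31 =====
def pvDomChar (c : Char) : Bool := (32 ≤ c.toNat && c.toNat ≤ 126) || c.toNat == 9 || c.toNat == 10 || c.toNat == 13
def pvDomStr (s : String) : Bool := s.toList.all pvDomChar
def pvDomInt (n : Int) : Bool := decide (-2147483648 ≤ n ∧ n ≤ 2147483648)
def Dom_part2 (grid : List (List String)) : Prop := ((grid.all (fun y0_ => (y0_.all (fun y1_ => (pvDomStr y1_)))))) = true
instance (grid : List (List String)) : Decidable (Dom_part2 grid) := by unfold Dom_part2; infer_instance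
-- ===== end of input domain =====

-- B reverses the DP direction: a backward (adjoint) sweep from the bottom row computes, per column,
-- the number of ways to reach the last row from there, and reads off that value at the start cell
-- (alternative algorithm, same asymptotic cost; no n×m counts table).
-- NOTE: mutation — neither A nor B mutates its argument.

-- ===== PORT A =====
-- inner 'for j in range(m): if grid[i][j] == "S": si, sj = i, j; break' (shared by both ports: both
-- Pythons contain this identical inner row scan)
def pvFindS (row : List String) : List Nat → Option Nat
  | [] => none
  | j :: rest => if row.getD j "" = "S" then some j else pvFindS row rest

-- one iteration of A's inner j-loop: the push updates on the current row 'cur'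
def pvPush (prevRow : List Int) (row : List String) (m : Nat) (cur : List Int) (j : Nat) : List Int :=
  let c := prevRow.getD j 0
  if row.getD j "" = "." then
    cur.set j (cur.getD j 0 + c)
  else if row.getD j "" = "^" then
    let cur1 := if 1 ≤ j then cur.set (j - 1) (cur.getD (j - 1) 0 + c) else cur
    if j < m - 1 then cur1.set (j + 1) (cur1.getD (j + 1) 0 + c) else cur1
  else cur

-- one iteration of A's outer i-loop (row i-1 is only read, row i is only written)
def pvStepA (grid : List (List String)) (m : Nat) (cts : List (List Int)) (i : Nat) : List (List Int) :=
  cts.set i ((List.range m).foldl (pvPush (cts.getD (i - 1) []) (grid.getD i []) m) (cts.getD i []))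

def part2 (grid : List (List String)) : Int :=
  let n := grid.length
  let m := (grid.getD 0 []).length
  let start := (List.range n).foldl (fun st i =>
      match pvFindS (grid.getD i []) (List.range m) with
      | some j => some (i, j)
      | none => st) (none : Option (Nat × Nat))
  match start with
  | none => 0   -- Python raises AssertionError here (excluded by Pre_part2)
  | some (si, sj) =>
    let counts : List (List Int) := List.replicate n (List.replicate m 0)
    let counts := counts.set si ((counts.getD si []).set sj 1)
    let counts := (List.range' (si + 1) (n - (si + 1))).foldl (pvStepA grid m) counts
    (PySem.List.pyGetD counts (-1) []).sum

-- ===== PORT B =====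
-- one iteration of B's backward i-loop: the comprehension building the new 'up' row
-- (up[j] = ways from column j of the row above row i to the bottom)
def pvBack (u : List Int) (row : List String) (m : Nat) : List Int :=
  (List.range m).map (fun j =>
    if row.getD j "" = "." then u.getD j 0
    else if row.getD j "" = "^" then
      (if 1 ≤ j then u.getD (j - 1) 0 else 0) + (if j + 1 < m then u.getD (j + 1) 0 else 0)
    else 0)

def part2_alt (grid : List (List String)) : Int :=
  let m := (grid.getD 0 []).length
  let start := (List.range grid.length).reverse.findSome? (fun i =>
      (pvFindS (grid.getD i []) (List.range m)).map (fun j => (i, j)))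
  match start with
  | none => 0   -- unreachable under Pre_part2 (Python asserts)
  | some (si, sj) =>
    let up := List.replicate m (1 : Int)
    -- 'for i in range(len(grid)-1, si, -1)': the indices n-1, n-2, …, si+1
    ((List.range' (si + 1) (grid.length - (si + 1))).reverse.foldl
        (fun u i => pvBack u (grid.getD i []) m) up).getD sj 0

-- ===== PRECONDITION & SPEC =====
-- Pre_ excludes exactly the inputs on which the Python A raises: the empty grid (IndexError on
-- grid[0]), grids in which the row scan finds no "S" (AssertionError), and ragged grids where the
-- start scan or the DP loop indexes past a row shorter than m = len(grid[0]) (IndexError).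
def Pre_part2 (grid : List (List String)) : Prop :=
  grid ≠ [] ∧
  (∀ row ∈ grid, (grid.getD 0 []).length ≤ row.length ∨ "S" ∈ row) ∧
  (∃ row ∈ grid, "S" ∈ row.take (grid.getD 0 []).length) ∧
  (∀ j, j < grid.length →
    (∀ i, i < grid.length → j ≤ i → "S" ∉ (grid.getD i []).take (grid.getD 0 []).length) →
    (grid.getD 0 []).length ≤ (grid.getD j []).length)
instance (grid : List (List String)) : Decidable (Pre_part2 grid) := by
  unfold Pre_part2; infer_instance

def pvWitness_part2 : List (List String) := [["S", "."], [".", "^"], [".", "."]]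

def Spec_part2 (grid : List (List String)) (out : Int) : Prop := out = part2_alt grid
instance (grid : List (List String)) (out : Int) : Decidable (Spec_part2 grid out) := by
  unfold Spec_part2; infer_instance

-- ===== CLAIM (what is proved, stated in full; the proofs are below) =====
def Claim_equal_part2 : Prop :=
  ∀ (grid : List (List String)), Dom_part2 grid → Pre_part2 grid → Spec_part2 grid (part2 grid)

-- ===== LEMMAS AND PROOFS =====

-- B's gather view of A's push row-update (proof-only; connects the two ports)
def pvGather (prev : List Int) (row : List String) (m : Nat) : List Int :=
  (List.range m).map (fun j =>
    (if row.getD j "" = "." then prev.getD j 0 else 0)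
    + (if 1 ≤ j ∧ row.getD (j - 1) "" = "^" then prev.getD (j - 1) 0 else 0)
    + (if j + 1 < m ∧ row.getD (j + 1) "" = "^" then prev.getD (j + 1) 0 else 0))

-- contribution of A's column j (of the row above) to cell t of the current row
def pvContrib (p : List Int) (r : List String) (m j t : Nat) : Int :=
  (if j = t ∧ r.getD j "" = "." then p.getD j 0 else 0)
  + (if j = t + 1 ∧ r.getD j "" = "^" then p.getD j 0 else 0)
  + (if j + 1 = t ∧ j < m - 1 ∧ r.getD j "" = "^" then p.getD j 0 else 0)

lemma push_length (p : List Int) (r : List String) (m : Nat) (cur : List Int) (j : Nat) :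
    (pvPush p r m cur j).length = cur.length := by
  unfold pvPush; dsimp only; split_ifs <;> simp

lemma getD_set' {α : Type} (l : List α) (i : Nat) (v : α) (t : Nat) (d : α) :
    (l.set i v).getD t d = if t = i ∧ i < l.length then v else l.getD t d := by
  simp only [List.getD_eq_getElem?_getD, List.getElem?_set]
  by_cases h1 : i = t
  · subst h1
    by_cases h2 : i < l.length
    · simp [h2]
    · simp [h2]
  · have h1' : ¬ (t = i) := fun h => h1 h.symm
    simp [h1, h1']

set_option maxHeartbeats 1000000 in
set_option maxRecDepth 10000 in
lemma push_getD (p : List Int) (r : List String) (m : Nat) (cur : List Int) (j t : Nat)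
    (hc : cur.length = m) (ht : t < m) (hj : j < m) :
    (pvPush p r m cur j).getD t 0 = cur.getD t 0 + pvContrib p r m j t := by
  unfold pvPush pvContrib
  have e : ∀ (l : List Int) (i : Nat) (v : Int) (tt : Nat),
      (l.set i v)[tt]?.getD 0 = if tt = i ∧ i < l.length then v else l[tt]?.getD 0 := by
    intro l i v tt
    rw [← List.getD_eq_getElem?_getD, ← List.getD_eq_getElem?_getD, getD_set' l i v tt 0]
  by_cases hdot : r.getD j "" = "."
  · have hdot' : r[j]?.getD "" = "." := by simpa using hdot
    simp [hdot', e, hc, ite_and]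
    split_ifs <;> (try subst_vars) <;> first | rfl | ring1 | omega | (exfalso; omega) | (simp only [Nat.add_sub_cancel]; first | rfl | ring1 | omega)
  · by_cases hcar : r.getD j "" = "^"
    · have hcar' : r[j]?.getD "" = "^" := by simpa using hcar
      by_cases hj1 : 1 ≤ j <;> by_cases hj2 : j < m - 1 <;>
        simp [hcar', hj1, hj2, e, hc, ite_and] <;>
        (try split_ifs) <;> (try subst_vars) <;> first | rfl | ring1 | omega | (exfalso; omega) | (simp only [Nat.add_sub_cancel]; first | rfl | ring1 | omega)
    · have hdot' : ¬ r[j]?.getD "" = "." := by simpa using hdot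
      have hcar' : ¬ r[j]?.getD "" = "^" := by simpa using hcar
      simp [hdot', hcar']

lemma foldl_push_length (p : List Int) (r : List String) (m : Nat) :
    ∀ (js : List Nat) (cur : List Int), (js.foldl (pvPush p r m) cur).length = cur.length := by
  intro js
  induction js with
  | nil => intro cur; rfl
  | cons j js ih => intro cur; simp [List.foldl_cons, ih, push_length]

lemma foldl_push_getD (p : List Int) (r : List String) (m : Nat) :
    ∀ (js : List Nat) (cur : List Int), cur.length = m → (∀ j ∈ js, j < m) → ∀ t, t < m →
      (js.foldl (pvPush p r m) cur).getD t 0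
        = cur.getD t 0 + (js.map (fun j => pvContrib p r m j t)).sum := by
  intro js
  induction js with
  | nil => intro cur _ _ t _; simp
  | cons j js ih =>
    intro cur hc hjs t ht
    simp only [List.foldl_cons, List.map_cons, List.sum_cons]
    rw [ih (pvPush p r m cur j) (by rw [push_length]; exact hc)
        (fun x hx => hjs x (List.mem_cons_of_mem _ hx)) t ht,
      push_getD p r m cur j t hc ht (hjs j (List.mem_cons_self))]
    ring

lemma sum_map_range_ite (m c : Nat) (f : Nat → Int) :
    ((List.range m).map (fun j => if j = c then f j else 0)).sum = if c < m then f c else 0 := by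
  induction m with
  | zero => simp
  | succ m ih =>
    rw [List.range_succ, List.map_append, List.sum_append, ih]
    by_cases h1 : c < m
    · simp [h1, Nat.lt_succ_of_lt h1, Nat.ne_of_gt h1]
    · by_cases h2 : m = c
      · subst h2; simp [h1]
      · have : ¬ c < m + 1 := by omega
        simp [h1, h2, this]

lemma sum_map_add_int (l : List Nat) (f g : Nat → Int) :
    (l.map (fun x => f x + g x)).sum = (l.map f).sum + (l.map g).sum := by
  induction l with
  | nil => simp
  | cons x l ih => simp [ih]; ring

lemma sum_contrib (p : List Int) (r : List String) (m t : Nat) (ht : t < m) :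
    ((List.range m).map (fun j => pvContrib p r m j t)).sum =
      (if r.getD t "" = "." then p.getD t 0 else 0)
      + (if 1 ≤ t ∧ r.getD (t - 1) "" = "^" then p.getD (t - 1) 0 else 0)
      + (if t + 1 < m ∧ r.getD (t + 1) "" = "^" then p.getD (t + 1) 0 else 0) := by
  unfold pvContrib
  rw [sum_map_add_int (List.range m)
      (fun j => (if j = t ∧ r.getD j "" = "." then p.getD j 0 else 0)
        + (if j = t + 1 ∧ r.getD j "" = "^" then p.getD j 0 else 0))
      (fun j => if j + 1 = t ∧ j < m - 1 ∧ r.getD j "" = "^" then p.getD j 0 else 0),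
    sum_map_add_int (List.range m)
      (fun j => if j = t ∧ r.getD j "" = "." then p.getD j 0 else 0)
      (fun j => if j = t + 1 ∧ r.getD j "" = "^" then p.getD j 0 else 0)]
  have e1 : (fun j => if j = t ∧ r.getD j "" = "." then p.getD j 0 else 0)
      = fun j => if j = t then (if r.getD j "" = "." then p.getD j 0 else 0) else 0 := by
    funext j; by_cases h : j = t <;> simp [h]
  have e2 : (fun j => if j = t + 1 ∧ r.getD j "" = "^" then p.getD j 0 else 0)
      = fun j => if j = t + 1 then (if r.getD j "" = "^" then p.getD j 0 else 0) else 0 := by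
    funext j; by_cases h : j = t + 1 <;> simp [h]
  have e3 : (fun j => if j + 1 = t ∧ j < m - 1 ∧ r.getD j "" = "^" then p.getD j 0 else 0)
      = fun j => if j = t - 1
          then (if j + 1 = t ∧ j < m - 1 ∧ r.getD j "" = "^" then p.getD j 0 else 0) else 0 := by
    funext j
    by_cases h : j = t - 1
    · rw [if_pos h]
    · have hno : ¬ (j + 1 = t ∧ j < m - 1 ∧ r.getD j "" = "^") := by
        rintro ⟨h1, _, _⟩; omega
      rw [if_neg hno, if_neg h]
  rw [e1, e2, e3, sum_map_range_ite m t, sum_map_range_ite m (t + 1), sum_map_range_ite m (t - 1)]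
  have ht1 : t - 1 < m := by omega
  have hcond : (t - 1 + 1 = t ∧ t - 1 < m - 1 ∧ r.getD (t - 1) "" = "^")
      ↔ (1 ≤ t ∧ r.getD (t - 1) "" = "^") := by
    constructor
    · rintro ⟨h1, h2, h3⟩; exact ⟨by omega, h3⟩
    · rintro ⟨h1, h2⟩; exact ⟨by omega, by omega, h2⟩
  simp only [ht, ht1, if_true, hcond, ite_and]
  ring

-- KEY (A-side): A's push pass over one row, started from a zero row, equals the gather row
lemma push_eq_gather (p : List Int) (r : List String) (m : Nat) :
    (List.range m).foldl (pvPush p r m) (List.replicate m 0) = pvGather p r m := by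
  apply List.ext_getElem
  · simp [foldl_push_length, pvGather]
  · intro t h1 h2
    have ht : t < m := by simpa [foldl_push_length] using h1
    have hL : ((List.range m).foldl (pvPush p r m) (List.replicate m 0)).getD t 0
        = (if r.getD t "" = "." then p.getD t 0 else 0)
          + (if 1 ≤ t ∧ r.getD (t - 1) "" = "^" then p.getD (t - 1) 0 else 0)
          + (if t + 1 < m ∧ r.getD (t + 1) "" = "^" then p.getD (t + 1) 0 else 0) := by
      rw [foldl_push_getD p r m (List.range m) (List.replicate m 0) (by simp)
          (fun j hj => List.mem_range.mp hj) t ht, sum_contrib p r m t ht]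
      simp
    have hgetD : ∀ (l : List Int) (h : t < l.length), l[t] = l.getD t 0 := by
      intro l h; rw [List.getD_eq_getElem l 0 h]
    rw [hgetD _ h1, hgetD _ h2, hL]
    simp [pvGather, List.getD_eq_getElem?_getD, ht]

lemma stepA_length (grid : List (List String)) (m : Nat) (cts : List (List Int)) (i : Nat) :
    (pvStepA grid m cts i).length = cts.length := by
  unfold pvStepA; simp

-- MAIN (A-side): A's table loop, on rows that are still all-zero, tracks the rolling gather row
lemma main_dp (grid : List (List String)) (m : Nat) :
    ∀ (k a : Nat) (cts : List (List Int)) (prev : List Int),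
      1 ≤ a → a + k ≤ cts.length →
      cts.getD (a - 1) [] = prev →
      (∀ t, a ≤ t → t < a + k → cts.getD t [] = List.replicate m 0) →
      ((List.range' a k).foldl (pvStepA grid m) cts).getD (a + k - 1) []
        = (List.range' a k).foldl (fun pr i => pvGather pr (grid.getD i []) m) prev := by
  intro k
  induction k with
  | zero =>
    intro a cts prev ha hlen h2 h3
    simpa using h2
  | succ k ih =>
    intro a cts prev ha hlen h2 h3
    rw [List.range'_succ]
    simp only [List.foldl_cons]
    have hstep : pvStepA grid m cts a = cts.set a (pvGather prev (grid.getD a []) m) := by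
      unfold pvStepA
      rw [h2, h3 a le_rfl (by omega), push_eq_gather]
    rw [hstep]
    have hidx : a + (k + 1) - 1 = (a + 1) + k - 1 := by omega
    rw [hidx]
    apply ih (a + 1) _ (pvGather prev (grid.getD a []) m) (by omega)
      (by simp only [List.length_set]; omega)
    · rw [getD_set']
      have : (a + 1 - 1 = a ∧ a < cts.length) := ⟨by omega, by omega⟩
      simp [this]
    · intro t h5 h6
      rw [getD_set']
      have hne : ¬ (t = a ∧ a < cts.length) := by rintro ⟨h, _⟩; omega
      simp only [hne, if_false]
      exact h3 t (by omega) (by omega)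

lemma foldl_stepA_length (grid : List (List String)) (m : Nat) :
    ∀ (l : List Nat) (cts : List (List Int)),
      (l.foldl (pvStepA grid m) cts).length = cts.length := by
  intro l
  induction l with
  | nil => intro cts; rfl
  | cons i l ih => intro cts; simp [List.foldl_cons, ih, stepA_length]

-- the overwrite-fold of A's start search equals B's reversed findSome?
lemma or_foldl {β : Type} (g : Nat → Option β) :
    ∀ (l : List Nat) (st : Option β),
      l.foldl (fun st i => ((g i).or st)) st = (l.reverse.findSome? g).or st := by
  intro l
  induction l with
  | nil => intro st; simp
  | cons x xs ih =>
    intro st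
    rw [List.foldl_cons, ih, List.reverse_cons, List.findSome?_append]
    cases hxs : xs.reverse.findSome? g <;> cases hx : g x <;> simp [List.findSome?, hx]

lemma findS_mem (row : List String) :
    ∀ (js : List Nat) (j : Nat), pvFindS row js = some j → j ∈ js := by
  intro js
  induction js with
  | nil => intro j h; simp [pvFindS] at h
  | cons x xs ih =>
    intro j h
    unfold pvFindS at h
    by_cases hx : row.getD x "" = "S"
    · rw [if_pos hx] at h; cases h; exact List.mem_cons_self
    · rw [if_neg hx] at h; exact List.mem_cons_of_mem _ (ih j h)

lemma start_bounds (n m : Nat) (grid : List (List String)) (si sj : Nat)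
    (hs : (List.range n).reverse.findSome?
        (fun i => (pvFindS (grid.getD i []) (List.range m)).map (fun j => (i, j)))
      = some (si, sj)) : si < n ∧ sj < m := by
  obtain ⟨i, hi, hfi⟩ := List.exists_of_findSome?_eq_some hs
  cases hf : pvFindS (grid.getD i []) (List.range m) with
  | none => rw [hf] at hfi; simp at hfi
  | some j =>
    rw [hf] at hfi
    simp only [Option.map_some, Option.some.injEq, Prod.mk.injEq] at hfi
    obtain ⟨h1, h2⟩ := hfi
    have hin : i < n := List.mem_range.mp (List.mem_reverse.mp hi)
    have hjm : j < m := List.mem_range.mp (findS_mem _ _ _ hf)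
    omega

-- ===== the B-side bridge: the backward sweep is the adjoint of the gather step =====

-- dot product over the first m columns (getD-total: no length hypotheses needed)
def pvDot (m : Nat) (c u : List Int) : Int :=
  ((List.range m).map (fun j => c.getD j 0 * u.getD j 0)).sum

lemma gather_getD (p : List Int) (r : List String) (m j : Nat) (hj : j < m) :
    (pvGather p r m).getD j 0 =
      (if r.getD j "" = "." then p.getD j 0 else 0)
      + (if 1 ≤ j ∧ r.getD (j - 1) "" = "^" then p.getD (j - 1) 0 else 0)
      + (if j + 1 < m ∧ r.getD (j + 1) "" = "^" then p.getD (j + 1) 0 else 0) := by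
  simp [pvGather, List.getD_eq_getElem?_getD, hj]

lemma back_getD (u : List Int) (r : List String) (m j : Nat) (hj : j < m) :
    (pvBack u r m).getD j 0 =
      if r.getD j "" = "." then u.getD j 0
      else if r.getD j "" = "^" then
        (if 1 ≤ j then u.getD (j - 1) 0 else 0) + (if j + 1 < m then u.getD (j + 1) 0 else 0)
      else 0 := by
  simp [pvBack, List.getD_eq_getElem?_getD, hj]

-- index-shift sums used by the adjoint lemma
lemma sum_shift_aux (g : Nat → Int) :
    ∀ m, ((List.range m).map (fun t => if 1 ≤ t then g (t - 1) else 0)).sum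
      = ((List.range (m - 1)).map g).sum := by
  intro m
  induction m with
  | zero => simp
  | succ k ih =>
    rw [List.range_succ, List.map_append, List.sum_append, ih]
    cases k with
    | zero => simp
    | succ k' =>
      simp only [Nat.add_sub_cancel]
      rw [List.range_succ, List.map_append, List.sum_append]
      simp

lemma sum_trunc_aux (g : Nat → Int) (m : Nat) :
    ((List.range m).map (fun j => if j + 1 < m then g j else 0)).sum
      = ((List.range (m - 1)).map g).sum := by
  cases m with
  | zero => simp
  | succ k =>
    rw [List.range_succ, List.map_append, List.sum_append]
    simp only [Nat.add_sub_cancel]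
    have h1 : (List.range k).map (fun j => if j + 1 < k + 1 then g j else 0)
        = (List.range k).map g :=
      List.map_congr_left (fun j hj => by
        have := List.mem_range.mp hj
        rw [if_pos (by omega)])
    rw [h1]
    simp

-- ADJOINT: dotting the gather of c against u equals dotting c against the backward step of u
set_option maxHeartbeats 1000000 in
lemma adjoint (c u : List Int) (r : List String) (m : Nat) :
    pvDot m (pvGather c r m) u = pvDot m c (pvBack u r m) := by
  unfold pvDot
  have hL : (List.range m).map (fun t => (pvGather c r m).getD t 0 * u.getD t 0)
      = (List.range m).map (fun t =>
          (if r.getD t "" = "." then c.getD t 0 * u.getD t 0 else 0)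
          + ((if 1 ≤ t then (if r.getD (t - 1) "" = "^" then c.getD (t - 1) 0 * u.getD (t - 1 + 1) 0 else 0) else 0)
          + (if t + 1 < m then (if r.getD (t + 1) "" = "^" then c.getD (t + 1) 0 * u.getD t 0 else 0) else 0))) :=
    List.map_congr_left (fun t ht => by
      rw [gather_getD c r m t (List.mem_range.mp ht)]
      by_cases h1 : 1 ≤ t
      · have ht1 : t - 1 + 1 = t := by omega
        rw [ht1]
        simp only [ite_and, h1, if_true]
        split_ifs <;> ring
      · simp only [ite_and, h1, if_false]
        split_ifs <;> ring)
  have hR : (List.range m).map (fun j => c.getD j 0 * (pvBack u r m).getD j 0)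
      = (List.range m).map (fun j =>
          (if r.getD j "" = "." then c.getD j 0 * u.getD j 0 else 0)
          + ((if j + 1 < m then (if r.getD j "" = "^" then c.getD j 0 * u.getD (j + 1) 0 else 0) else 0)
          + (if 1 ≤ j then (if r.getD (j - 1 + 1) "" = "^" then c.getD (j - 1 + 1) 0 * u.getD (j - 1) 0 else 0) else 0))) :=
    List.map_congr_left (fun j hj => by
      rw [back_getD u r m j (List.mem_range.mp hj)]
      clear hL
      by_cases h1 : 1 ≤ j
      · have hj1 : j - 1 + 1 = j := by omega
        rw [hj1]
        by_cases hdot : r.getD j "" = "."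
        · have hne : ¬ r.getD j "" = "^" := by rw [hdot]; decide
          simp only [hdot, hne, h1, if_true, if_false]
          split_ifs <;> first | ring1 | (exfalso; simp_all)
        · by_cases hcar : r.getD j "" = "^"
          · simp only [hdot, hcar, h1, if_true, if_false]
            split_ifs <;> first | ring1 | (exfalso; simp_all)
          · simp only [hdot, hcar, h1, if_true, if_false]
            split_ifs <;> first | ring1 | (exfalso; simp_all)
      · by_cases hdot : r.getD j "" = "."
        · have hne : ¬ r.getD j "" = "^" := by rw [hdot]; decide
          simp only [hdot, hne, h1, if_true, if_false]
          split_ifs <;> first | ring1 | (exfalso; simp_all)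
        · by_cases hcar : r.getD j "" = "^"
          · simp only [hdot, hcar, h1, if_true, if_false]
            split_ifs <;> first | ring1 | (exfalso; simp_all)
          · simp only [hdot, hcar, h1, if_true, if_false]
            split_ifs <;> first | ring1 | (exfalso; simp_all))
  rw [hL, hR, sum_map_add_int, sum_map_add_int, sum_map_add_int, sum_map_add_int]
  rw [sum_shift_aux (fun t => if r.getD t "" = "^" then c.getD t 0 * u.getD (t + 1) 0 else 0) m,
      sum_trunc_aux (fun j => if r.getD j "" = "^" then c.getD j 0 * u.getD (j + 1) 0 else 0) m,
      sum_trunc_aux (fun t => if r.getD (t + 1) "" = "^" then c.getD (t + 1) 0 * u.getD t 0 else 0) m,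
      sum_shift_aux (fun j => if r.getD (j + 1) "" = "^" then c.getD (j + 1) 0 * u.getD j 0 else 0) m]

-- the fold transposition: forward gather-fold against u = c against backward fold
lemma dot_fold (grid : List (List String)) (m : Nat) :
    ∀ (l : List Nat) (c u : List Int),
      pvDot m (l.foldl (fun pr i => pvGather pr (grid.getD i []) m) c) u
        = pvDot m c (l.foldr (fun i v => pvBack v (grid.getD i []) m) u) := by
  intro l
  induction l with
  | nil => intro c u; rfl
  | cons i l ih =>
    intro c u
    rw [List.foldl_cons, ih, List.foldr_cons, adjoint]

lemma sum_getD_range (l : List Int) :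
    ((List.range l.length).map (fun j => l.getD j 0)).sum = l.sum := by
  induction l using List.reverseRecOn with
  | nil => simp
  | append_singleton l a ih =>
    rw [List.length_append, List.length_singleton, List.range_succ, List.map_append,
        List.sum_append, List.sum_append, List.sum_singleton]
    have h1 : (List.range l.length).map (fun j => (l ++ [a]).getD j 0)
        = (List.range l.length).map (fun j => l.getD j 0) :=
      List.map_congr_left (fun j hj => by
        have hjl := List.mem_range.mp hj
        rw [List.getD_eq_getElem _ _ (by simpa using Nat.lt_succ_of_lt hjl),
            List.getD_eq_getElem _ _ hjl, List.getElem_append_left hjl])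
    have h2 : (l ++ [a]).getD l.length 0 = a := by
      rw [List.getD_eq_getElem _ _ (by simp)]
      simp
    rw [h1, ih]
    simp [h2]

lemma sum_eq_dot_ones (m : Nat) (l : List Int) (hl : l.length = m) :
    l.sum = pvDot m l (List.replicate m 1) := by
  unfold pvDot
  rw [← hl, ← sum_getD_range l]
  exact (congrArg List.sum (List.map_congr_left (fun j hj => by
    have hjl := List.mem_range.mp hj
    rw [List.getD_eq_getElem (List.replicate l.length (1:Int)) 0 (by simpa using hjl)]
    simp))).symm

lemma dot_basis (m sj : Nat) (hsj : sj < m) (u : List Int) :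
    pvDot m ((List.replicate m (0 : Int)).set sj 1) u = u.getD sj 0 := by
  unfold pvDot
  have h1 : (List.range m).map (fun j => ((List.replicate m (0 : Int)).set sj 1).getD j 0 * u.getD j 0)
      = (List.range m).map (fun j => if j = sj then u.getD j 0 else 0) :=
    List.map_congr_left (fun j hj => by
      rw [getD_set']
      by_cases h : j = sj
      · simp [h, hsj]
      · simp [h])
  rw [h1, sum_map_range_ite m sj (fun j => u.getD j 0), if_pos hsj]

lemma gather_fold_length (grid : List (List String)) (m : Nat) :
    ∀ (l : List Nat) (c : List Int), c.length = m →
      (l.foldl (fun pr i => pvGather pr (grid.getD i []) m) c).length = m := by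
  intro l
  induction l with
  | nil => intro c hc; exact hc
  | cons i l ih => intro c hc; rw [List.foldl_cons]; exact ih _ (by simp [pvGather])

-- ===== VERDICT (by name: the statement is the Claim_ definition above) =====
theorem part2_spec : Claim_equal_part2 := by
  intro grid _ _
  unfold Spec_part2 part2 part2_alt
  dsimp only
  have hfun : (fun (st : Option (Nat × Nat)) i =>
        match pvFindS (grid.getD i []) (List.range (grid.getD 0 []).length) with
        | some j => some (i, j)
        | none => st)
      = fun st i => ((pvFindS (grid.getD i []) (List.range (grid.getD 0 []).length)).map
          (fun j => (i, j))).or st := by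
    funext st i
    cases pvFindS (grid.getD i []) (List.range (grid.getD 0 []).length) <;> rfl
  rw [hfun, or_foldl, Option.or_none]
  cases hs : (List.range grid.length).reverse.findSome?
      (fun i => (pvFindS (grid.getD i []) (List.range (grid.getD 0 []).length)).map
        (fun j => (i, j))) with
  | none => rfl
  | some p =>
    obtain ⟨si, sj⟩ := p
    obtain ⟨hsi, hsj⟩ := start_bounds _ _ _ _ _ hs
    set n := grid.length with hn
    set m := (grid.getD 0 []).length with hm
    dsimp only
    have hrep : (List.replicate n (List.replicate m (0 : Int))).getD si [] = List.replicate m 0 := by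
      rw [List.getD_eq_getElem _ _ (by simpa using hsi)]
      simp
    rw [hrep]
    set cts0 := (List.replicate n (List.replicate m (0 : Int))).set si
      ((List.replicate m (0 : Int)).set sj 1) with hc0
    have hc0len : cts0.length = n := by simp [hc0]
    have hmain := main_dp grid m (n - (si + 1)) (si + 1) cts0
      ((List.replicate m (0 : Int)).set sj 1) (by omega) (by omega)
      (by
        rw [hc0, getD_set']
        have hcnd : (si + 1 - 1 = si ∧
            si < (List.replicate n (List.replicate m (0 : Int))).length) :=
          ⟨by omega, by simpa using hsi⟩
        rw [if_pos hcnd])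
      (by
        intro t h5 h6
        rw [hc0, getD_set']
        have hne : ¬ (t = si ∧ si < (List.replicate n (List.replicate m (0 : Int))).length) := by
          rintro ⟨h, _⟩; omega
        rw [if_neg hne, List.getD_eq_getElem _ _ (by simp; omega)]
        simp)
    have hidx : si + 1 + (n - (si + 1)) - 1 = n - 1 := by omega
    rw [hidx] at hmain
    set ctsF := (List.range' (si + 1) (n - (si + 1))).foldl (pvStepA grid m) cts0 with hF
    have hFlen : ctsF.length = n := by rw [hF, foldl_stepA_length, hc0len]
    have hFne : ctsF ≠ [] := by
      intro h; rw [h] at hFlen; simp at hFlen; omega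
    have hlast : PySem.List.pyGetD ctsF (-1) [] = ctsF.getD (n - 1) [] := by
      rw [PySem.List.pyGetD_neg_one _ _ hFne, List.getLast_eq_getElem,
        List.getD_eq_getElem _ _ (by omega)]
      congr 1
      omega
    rw [hlast, hmain]
    -- A's value = sum of the forward gather-fold; convert via the adjoint to B's backward sweep
    rw [sum_eq_dot_ones m _ (gather_fold_length grid m _ _ (by simp)),
        dot_fold, dot_basis m sj hsj, List.foldl_reverse]
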